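-- pv_equiv track=rewrite | github.com/rhkdguskim/Study | Algorithm/python/카카오/택배배달과수거하기.py | solution
-- ===== SOURCE A (Python) =====
-- def solution(cap, n, deliveries, pickups):
--     s_deliveries = []
--     s_pickups = []
--     for i in range(n):
--         if deliveries[i]:
--             for _ in range(deliveries[i]):
--                 s_deliveries.append(i+1)
--
--         if pickups[i]:
--             for _ in range(pickups[i]):
--                 s_pickups.append(i+1)
--
--     answer = 0
--     while s_deliveries or s_pickups:
--         # 재활용상자와 배달상자가 모두 있는경우
--         move_pos = 0
--         if s_deliveries and s_pickups:
--             move_pos = max(s_deliveries[-1], s_pickups[-1])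
--         # 배달상자만 있는경우
--         elif s_deliveries:
--             move_pos = s_deliveries[-1]
--         # 픽업상자만 있는경우
--         else:
--             move_pos = s_pickups[-1]
--
--         for _ in range(cap):
--             if s_deliveries:
--                 s_deliveries.pop()
--
--             if s_pickups:
--                 s_pickups.pop()
--
--         #트럭이 이동해야할 거리
--         answer += move_pos * 2
--
--     return answer
-- ===== SOURCE B (Python) =====
-- def solution(cap, n, deliveries, pickups):
--     answer = 0
--     d_rem = 0
--     p_rem = 0
--     for i in reversed(range(n)):
--         d_rem += max(deliveries[i], 0)
--         p_rem += max(pickups[i], 0)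
--         need = max(d_rem, p_rem)
--         if need > 0:
--             trips = -(-need // cap)
--             answer += 2 * (i + 1) * trips
--             d_rem -= trips * cap
--             p_rem -= trips * cap
--     return answer
-- ===== Notes on version B (the rewrite author's own statement) =====
-- stated objective: alternative
-- what changed: A materialises one stack entry per individual box and pops boxes one at a time per trip; B never builds the stacks: it scans positions once from the farthest, keeps running leftover-capacity counters and charges each position ceil(need/cap) trips in O(1) arithmetic.
import Mathlib
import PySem

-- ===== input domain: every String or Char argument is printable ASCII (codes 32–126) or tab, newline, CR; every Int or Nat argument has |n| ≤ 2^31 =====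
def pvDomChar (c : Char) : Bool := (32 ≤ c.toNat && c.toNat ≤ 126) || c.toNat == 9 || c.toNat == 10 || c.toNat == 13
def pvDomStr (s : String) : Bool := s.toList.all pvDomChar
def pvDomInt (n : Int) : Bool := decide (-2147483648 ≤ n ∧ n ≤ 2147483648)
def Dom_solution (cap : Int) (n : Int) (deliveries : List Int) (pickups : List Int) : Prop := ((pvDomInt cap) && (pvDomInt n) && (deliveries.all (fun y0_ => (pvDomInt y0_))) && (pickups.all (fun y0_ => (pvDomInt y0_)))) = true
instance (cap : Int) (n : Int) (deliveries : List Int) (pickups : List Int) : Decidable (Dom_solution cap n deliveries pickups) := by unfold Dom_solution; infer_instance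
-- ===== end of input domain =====

-- B replaces A's box-by-box stacks with one far-to-near scan keeping leftover-capacity
-- counters and a ceiling division per position (objective: alternative algorithm).

-- ===== PORT A =====
-- 'for _ in range(k): s.append(i+1)' appends (i+1) exactly k.toNat times
def pvBuild (n : Int) (deliveries pickups : List Int) : List Int × List Int :=
  (PySem.List.pyRange 0 n 1).foldl (fun (st : List Int × List Int) i =>
    let di := (PySem.List.pyGet? deliveries i).getD 0   -- in range under Pre_solution
    let pi := (PySem.List.pyGet? pickups i).getD 0
    let sd := if di ≠ 0 then st.1 ++ List.replicate di.toNat (i + 1) else st.1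
    let sp := if pi ≠ 0 then st.2 ++ List.replicate pi.toNat (i + 1) else st.2
    (sd, sp)) ([], [])

-- 'for _ in range(cap): if sd: sd.pop(); if sp: sp.pop()'
def pvPopBoth : Nat → List Int → List Int → List Int × List Int
  | 0, sd, sp => (sd, sp)
  | k + 1, sd, sp =>
      pvPopBoth k (if sd.isEmpty then sd else sd.dropLast)
                  (if sp.isEmpty then sp else sp.dropLast)

-- the 'while s_deliveries or s_pickups' loop; fuel |sd|+|sp| suffices whenever the
-- Python loop terminates (Pre_solution); on exhausted fuel (Python diverges) returns acc
def pvLoopA (cap : Int) : Nat → List Int → List Int → Int → Int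
  | 0, _, _, acc => acc
  | fuel + 1, sd, sp, acc =>
      if sd = [] ∧ sp = [] then acc
      else
        let move : Int :=
          if sd ≠ [] ∧ sp ≠ [] then max (sd.getLastD 0) (sp.getLastD 0)
          else if sd ≠ [] then sd.getLastD 0
          else sp.getLastD 0
        let st := pvPopBoth cap.toNat sd sp
        pvLoopA cap fuel st.1 st.2 (acc + move * 2)

def solution (cap : Int) (n : Int) (deliveries : List Int) (pickups : List Int) : Int :=
  let st := pvBuild n deliveries pickups
  pvLoopA cap (st.1.length + st.2.length) st.1 st.2 0

-- ===== PORT B =====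
def solution_alt (cap : Int) (n : Int) (deliveries : List Int) (pickups : List Int) : Int :=
  (((PySem.List.pyRange 0 n 1).reverse).foldl (fun (st : Int × Int × Int) i =>
    let d_rem := st.2.1 + max ((PySem.List.pyGet? deliveries i).getD 0) 0
    let p_rem := st.2.2 + max ((PySem.List.pyGet? pickups i).getD 0) 0
    let need := max d_rem p_rem
    if 0 < need then
      let trips := -(PySem.Int.floordiv (-need) cap)   -- -(-need // cap)
      (st.1 + 2 * (i + 1) * trips, d_rem - trips * cap, p_rem - trips * cap)
    else (st.1, d_rem, p_rem)) (0, 0, 0)).1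

-- ===== PRECONDITION & SPEC =====
-- Pre_ excludes exactly the inputs where Python A does not return: n beyond either list
-- length (IndexError) and cap ≤ 0 while some box exists (A's while loop never terminates).
def Pre_solution (cap : Int) (n : Int) (deliveries : List Int) (pickups : List Int) : Prop :=
  n ≤ (deliveries.length : Int) ∧ n ≤ (pickups.length : Int) ∧
  (1 ≤ cap ∨ ((∀ x ∈ deliveries.take n.toNat, x ≤ 0) ∧ (∀ x ∈ pickups.take n.toNat, x ≤ 0)))

instance (cap : Int) (n : Int) (deliveries : List Int) (pickups : List Int) : Decidable (Pre_solution cap n deliveries pickups) := by unfold Pre_solution; infer_instance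

def pvWitness_solution : Int × Int × List Int × List Int := (2, 3, [1, 0, 3], [0, 3, 0])

def Spec_solution (cap : Int) (n : Int) (deliveries : List Int) (pickups : List Int) (out : Int) : Prop := out = solution_alt cap n deliveries pickups
instance (cap : Int) (n : Int) (deliveries : List Int) (pickups : List Int) (out : Int) : Decidable (Spec_solution cap n deliveries pickups out) := by unfold Spec_solution; infer_instance

-- ===== CLAIM (what is proved, stated in full; the proofs are below) =====
def Claim_equal_solution : Prop := ∀ (cap : Int) (n : Int) (deliveries : List Int) (pickups : List Int), Dom_solution cap n deliveries pickups → Pre_solution cap n deliveries pickups → Spec_solution cap n deliveries pickups (solution cap n deliveries pickups)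

-- ===== LEMMAS AND PROOFS =====

-- clamped per-position box counts, farthest position first (position of head = length)
def pvSegs (n : Int) (d p : List Int) : List (Nat × Nat) :=
  (((d.take n.toNat).zip (p.take n.toNat)).reverse).map (fun q => (q.1.toNat, q.2.toNat))

-- the delivery stack, top (= farthest box) first
def pvExpD : List (Nat × Nat) → List Int
  | [] => []
  | s :: rest => List.replicate s.1 ((rest.length : Int) + 1) ++ pvExpD rest

def pvExpP : List (Nat × Nat) → List Int
  | [] => []
  | s :: rest => List.replicate s.2 ((rest.length : Int) + 1) ++ pvExpP rest

def pvCeil (cap m : Int) : Int := -(PySem.Int.floordiv (-m) cap)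

-- B's algorithm as a recursion on the far-first segment list
def pvSpecB (cap : Int) : List (Nat × Nat) → Int → Int → Int → Int
  | [], _, _, acc => acc
  | s :: rest, d, p, acc =>
      let d' := d + (s.1 : Int)
      let p' := p + (s.2 : Int)
      let need := max d' p'
      if 0 < need then
        let t := pvCeil cap need
        pvSpecB cap rest (d' - t * cap) (p' - t * cap) (acc + 2 * ((rest.length : Int) + 1) * t)
      else pvSpecB cap rest d' p' acc

-- A's while loop on the reversed stacks (top = head)
def pvLoopR (capN : Nat) : Nat → List Int → List Int → Int → Int
  | 0, _, _, acc => acc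
  | fuel + 1, rd, rp, acc =>
      if rd = [] ∧ rp = [] then acc
      else
        let move : Int :=
          if rd ≠ [] ∧ rp ≠ [] then max (rd.headD 0) (rp.headD 0)
          else if rd ≠ [] then rd.headD 0
          else rp.headD 0
        pvLoopR capN fuel (rd.drop capN) (rp.drop capN) (acc + move * 2)

theorem pvStep_dropLast (l : List Int) :
    (if l.isEmpty then l else l.dropLast) = l.dropLast := by
  cases l <;> simp

theorem pvDropLast_reverse (l : List Int) : l.dropLast = (l.reverse.tail).reverse := by
  cases h : l.reverse with
  | nil => simp [List.reverse_eq_nil_iff.mp h]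
  | cons x xs =>
      have hl : l = xs.reverse ++ [x] := by
        rw [← List.reverse_reverse l, h]; simp
      rw [hl]; simp

theorem pvPopBoth_eq (k : Nat) : ∀ (sd sp : List Int),
    pvPopBoth k sd sp = (((sd.reverse.drop k).reverse), ((sp.reverse.drop k).reverse)) := by
  induction k with
  | zero => intro sd sp; simp [pvPopBoth]
  | succ k ih =>
      intro sd sp
      rw [pvPopBoth, pvStep_dropLast, pvStep_dropLast, ih]
      have e : ∀ l : List Int, List.drop k l.dropLast.reverse = List.drop (k + 1) l.reverse := by
        intro l
        rw [pvDropLast_reverse, List.reverse_reverse, ← List.drop_one, List.drop_drop, Nat.add_comm]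
      rw [e, e]

theorem pvGetLastD_reverse (l : List Int) : l.getLastD 0 = l.reverse.headD 0 := by
  cases h : l.reverse with
  | nil => simp [List.reverse_eq_nil_iff.mp h]
  | cons x xs =>
      have : l = (x :: xs).reverse := by rw [← h, List.reverse_reverse]
      subst this; simp

theorem pvLoopA_eq_loopR (cap : Int) : ∀ (fuel : Nat) (sd sp : List Int) (acc : Int),
    pvLoopA cap fuel sd sp acc = pvLoopR cap.toNat fuel sd.reverse sp.reverse acc := by
  intro fuel
  induction fuel with
  | zero => intro sd sp acc; rfl
  | succ fuel ih =>
      intro sd sp acc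
      rw [pvLoopA, pvLoopR]
      simp only [pvPopBoth_eq, ih, List.reverse_eq_nil_iff, List.reverse_reverse,
        pvGetLastD_reverse, ne_eq]

-- every stack entry is at most the number of positions
theorem pvExpD_le (segs : List (Nat × Nat)) :
    ∀ x ∈ pvExpD segs, x ≤ (segs.length : Int) := by
  induction segs with
  | nil => simp [pvExpD]
  | cons s rest ih =>
      intro x hx
      rw [pvExpD] at hx
      rcases List.mem_append.mp hx with h | h
      · have := List.eq_of_mem_replicate h; simp [this]
      · have := ih x h; simp; omega

theorem pvExpP_le (segs : List (Nat × Nat)) :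
    ∀ x ∈ pvExpP segs, x ≤ (segs.length : Int) := by
  induction segs with
  | nil => simp [pvExpP]
  | cons s rest ih =>
      intro x hx
      rw [pvExpP] at hx
      rcases List.mem_append.mp hx with h | h
      · have := List.eq_of_mem_replicate h; simp [this]
      · have := ih x h; simp; omega

theorem pvCeil_one (cap m : Int) (hc : 1 ≤ cap) (h1 : 0 < m) (h2 : m ≤ cap) :
    pvCeil cap m = 1 := by
  unfold pvCeil
  rw [PySem.Int.neg_floordiv_neg_eq_iff_of_pos (by omega)]
  omega

theorem pvCeil_step (cap m : Int) (hc : 1 ≤ cap) (h1 : 0 < m - cap) :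
    pvCeil cap m = pvCeil cap (m - cap) + 1 := by
  unfold pvCeil
  set q := PySem.Int.floordiv (-(m - cap)) cap with hqdef
  have hq : q * cap ≤ -(m - cap) ∧ -(m - cap) < (q + 1) * cap :=
    (PySem.Int.floordiv_eq_iff_of_pos (by omega)).mp hqdef.symm
  have : PySem.Int.floordiv (-m) cap = q - 1 := by
    rw [PySem.Int.floordiv_eq_iff_of_pos (by omega)]
    have e1 : (q - 1) * cap = q * cap - cap := by ring
    have e2 : (q - 1 + 1) * cap = q * cap := by ring
    have e3 : (q + 1) * cap = q * cap + cap := by ring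
    omega
  omega

-- drop a (replicate c v ++ l) when c ≤ a
theorem pvDrop_repl_ge {c a : Nat} (v : Int) (l : List Int) (h : c ≤ a) :
    (List.replicate c v ++ l).drop a = l.drop (a - c) := by
  have h2 := List.drop_length_add_append (i := a - c) (l₁ := List.replicate c v) (l₂ := l)
  have e : (List.replicate c v).length + (a - c) = a := by simp; omega
  rw [e] at h2
  exact h2

theorem pvDrop_repl_lt {c a : Nat} (v : Int) (l : List Int) (h : a < c) :
    (List.replicate c v ++ l).drop a = List.replicate (c - a) v ++ l := by
  rw [List.drop_append_of_le_length (by simp; omega), List.drop_replicate]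

-- ===== the main correspondence =====
-- Inner loop: at head segment (cd,cp) with a (resp. b) boxes already removed from the
-- full stacks, A's trips at this position match one ceiling-division step of B.
theorem pvInner (cap : Int) (hc : 1 ≤ cap) (cd cp : Nat) (rest : List (Nat × Nat))
    (hIH : ∀ (a b : Nat) (acc : Int) (fuel : Nat),
        ((pvExpD rest).drop a).length + ((pvExpP rest).drop b).length ≤ fuel →
        pvLoopR cap.toNat fuel ((pvExpD rest).drop a) ((pvExpP rest).drop b) acc
          = pvSpecB cap rest (-(a : Int)) (-(b : Int)) acc) :
    ∀ (k : Nat) (a b : Nat) (acc : Int) (fuel : Nat),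
      (max ((cd : Int) - a) ((cp : Int) - b)).toNat ≤ k →
      ((pvExpD ((cd, cp) :: rest)).drop a).length + ((pvExpP ((cd, cp) :: rest)).drop b).length ≤ fuel →
      pvLoopR cap.toNat fuel ((pvExpD ((cd, cp) :: rest)).drop a) ((pvExpP ((cd, cp) :: rest)).drop b) acc
        = (let d' := (cd : Int) - a
           let p' := (cp : Int) - b
           let need := max d' p'
           if 0 < need then
             let t := pvCeil cap need
             pvSpecB cap rest (d' - t * cap) (p' - t * cap) (acc + 2 * ((rest.length : Int) + 1) * t)
           else pvSpecB cap rest d' p' acc) := by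
  intro k
  induction k with
  | zero =>
      intro a b acc fuel hk hfuel
      -- max ≤ 0 : no trip at this position
      have hda : cd ≤ a := by omega
      have hpb : cp ≤ b := by omega
      simp only [pvExpD, pvExpP] at hfuel ⊢
      rw [pvDrop_repl_ge _ _ hda, pvDrop_repl_ge _ _ hpb] at hfuel ⊢
      have h0 : ¬ (0 < max ((cd : Int) - a) ((cp : Int) - b)) := by omega
      simp only [h0, if_false]
      rw [hIH (a - cd) (b - cp) acc fuel hfuel]
      congr 1 <;> omega
  | succ k ihk =>
      intro a b acc fuel hk hfuel
      by_cases hpos : 0 < max ((cd : Int) - a) ((cp : Int) - b)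
      · -- at least one trip at position rest.length+1 remains
        have hcapN : ((cap.toNat : Int)) = cap := by omega
        -- the two current stacks
        set pos : Int := (rest.length : Int) + 1 with hpos_def
        have hne : ¬ (((pvExpD ((cd, cp) :: rest)).drop a) = [] ∧ ((pvExpP ((cd, cp) :: rest)).drop b) = []) := by
          rcases (by omega : (a : Int) < cd ∨ (b : Int) < cp) with h | h
          · have ha : a < cd := by omega
            intro ⟨h1, _⟩
            rw [pvExpD, pvDrop_repl_lt _ _ ha] at h1
            simp at h1; omega
          · have hb : b < cp := by omega
            intro ⟨_, h2⟩
            rw [pvExpP, pvDrop_repl_lt _ _ hb] at h2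
            simp at h2; omega
        -- fuel must be positive
        cases fuel with
        | zero =>
            exfalso
            rcases (by omega : (a : Int) < cd ∨ (b : Int) < cp) with h | h
            · have ha : a < cd := by omega
              rw [pvExpD, pvDrop_repl_lt _ _ ha] at hfuel
              simp at hfuel; omega
            · have hb : b < cp := by omega
              rw [pvExpP, pvDrop_repl_lt _ _ hb] at hfuel
              simp at hfuel; omega
        | succ fuel =>
        rw [pvLoopR]
        simp only [hne, if_false]
        -- the computed move is pos
        have hheadD : ((pvExpD ((cd, cp) :: rest)).drop a) ≠ [] →
            (((pvExpD ((cd, cp) :: rest)).drop a).headD 0) ≤ pos := by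
          intro h
          have hm : (((pvExpD ((cd, cp) :: rest)).drop a).headD 0) ∈ (pvExpD ((cd, cp) :: rest)).drop a := by
            cases hl : (pvExpD ((cd, cp) :: rest)).drop a with
            | nil => exact absurd hl h
            | cons x xs => simp [hl]
          have := pvExpD_le ((cd, cp) :: rest) _ (List.mem_of_mem_drop hm)
          simpa [hpos_def] using this
        have hheadP : ((pvExpP ((cd, cp) :: rest)).drop b) ≠ [] →
            (((pvExpP ((cd, cp) :: rest)).drop b).headD 0) ≤ pos := by
          intro h
          have hm : (((pvExpP ((cd, cp) :: rest)).drop b).headD 0) ∈ (pvExpP ((cd, cp) :: rest)).drop b := by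
            cases hl : (pvExpP ((cd, cp) :: rest)).drop b with
            | nil => exact absurd hl h
            | cons x xs => simp [hl]
          have := pvExpP_le ((cd, cp) :: rest) _ (List.mem_of_mem_drop hm)
          simpa [hpos_def] using this
        have hheadDeq : a < cd → (((pvExpD ((cd, cp) :: rest)).drop a).headD 0) = pos := by
          intro ha
          rw [pvExpD, pvDrop_repl_lt _ _ ha]
          cases hcc : cd - a with
          | zero => omega
          | succ m => simp [List.replicate_succ, hpos_def]
        have hheadPeq : b < cp → (((pvExpP ((cd, cp) :: rest)).drop b).headD 0) = pos := by
          intro hb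
          rw [pvExpP, pvDrop_repl_lt _ _ hb]
          cases hcc : cp - b with
          | zero => omega
          | succ m => simp [List.replicate_succ, hpos_def]
        have hDne : a < cd → ((pvExpD ((cd, cp) :: rest)).drop a) ≠ [] := by
          intro ha h
          rw [pvExpD, pvDrop_repl_lt _ _ ha] at h
          simp at h; omega
        have hPne : b < cp → ((pvExpP ((cd, cp) :: rest)).drop b) ≠ [] := by
          intro hb h
          rw [pvExpP, pvDrop_repl_lt _ _ hb] at h
          simp at h; omega
        have hmove : (if ((pvExpD ((cd, cp) :: rest)).drop a) ≠ [] ∧ ((pvExpP ((cd, cp) :: rest)).drop b) ≠ [] then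
              max (((pvExpD ((cd, cp) :: rest)).drop a).headD 0) (((pvExpP ((cd, cp) :: rest)).drop b).headD 0)
            else if ((pvExpD ((cd, cp) :: rest)).drop a) ≠ [] then ((pvExpD ((cd, cp) :: rest)).drop a).headD 0
            else ((pvExpP ((cd, cp) :: rest)).drop b).headD 0) = pos := by
          rcases (by omega : (a : Int) < cd ∨ (b : Int) < cp) with h | h
          · have ha : a < cd := by omega
            have h1 := hDne ha
            by_cases h2 : ((pvExpP ((cd, cp) :: rest)).drop b) = []
            · simp only [h1, h2, ne_eq, not_true_eq_false, and_false, if_false, not_false_eq_true, if_true]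
              exact hheadDeq ha
            · simp only [h1, h2, ne_eq, not_false_eq_true, and_true, if_true, true_and]
              have := hheadP h2
              have := hheadDeq ha
              omega
          · have hb : b < cp := by omega
            have h2 := hPne hb
            by_cases h1 : ((pvExpD ((cd, cp) :: rest)).drop a) = []
            · simp only [h1, h2, ne_eq, not_true_eq_false, false_and, if_false, if_true, not_false_eq_true]
              exact hheadPeq hb
            · simp only [h1, h2, ne_eq, not_false_eq_true, and_true, if_true, true_and]
              have := hheadD h1
              have := hheadPeq hb
              omega
        rw [hmove]
        rw [List.drop_drop, List.drop_drop]
        -- recurse via ihk at carries a + cap, b + cap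
        have hstep := ihk (a + cap.toNat) (b + cap.toNat) (acc + pos * 2) fuel
          (by omega)
          (by
            rcases (by omega : (a : Int) < cd ∨ (b : Int) < cp) with h | h
            · have ha : a < cd := by omega
              have hlen : a < ((pvExpD ((cd, cp) :: rest))).length := by
                rw [pvExpD]; simp; omega
              have h1 : ((pvExpD ((cd, cp) :: rest)).drop (a + cap.toNat)).length
                  ≤ ((pvExpD ((cd, cp) :: rest)).drop a).length - 1 := by
                simp [List.length_drop]; omega
              have h2 : ((pvExpP ((cd, cp) :: rest)).drop (b + cap.toNat)).length
                  ≤ ((pvExpP ((cd, cp) :: rest)).drop b).length := by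
                simp [List.length_drop]; omega
              have h3 : 1 ≤ ((pvExpD ((cd, cp) :: rest)).drop a).length := by
                simp [List.length_drop]; omega
              omega
            · have hb : b < cp := by omega
              have hlen : b < ((pvExpP ((cd, cp) :: rest))).length := by
                rw [pvExpP]; simp; omega
              have h1 : ((pvExpP ((cd, cp) :: rest)).drop (b + cap.toNat)).length
                  ≤ ((pvExpP ((cd, cp) :: rest)).drop b).length - 1 := by
                simp [List.length_drop]; omega
              have h2 : ((pvExpD ((cd, cp) :: rest)).drop (a + cap.toNat)).length
                  ≤ ((pvExpD ((cd, cp) :: rest)).drop a).length := by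
                simp [List.length_drop]; omega
              have h3 : 1 ≤ ((pvExpP ((cd, cp) :: rest)).drop b).length := by
                simp [List.length_drop]; omega
              omega)
        rw [hstep]
        -- arithmetic: one trip step of the ceiling formula
        dsimp only
        set m := max ((cd : Int) - a) ((cp : Int) - b) with hm
        have hm' : max ((cd : Int) - ((a + cap.toNat : Nat) : Int)) ((cp : Int) - ((b + cap.toNat : Nat) : Int)) = m - cap := by
          push_cast; omega
        rw [hm', if_pos hpos]
        by_cases hrem : 0 < m - cap
        · rw [if_pos hrem, pvCeil_step cap m hc hrem]
          push_cast [hcapN]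
          ring_nf
        · rw [if_neg hrem, pvCeil_one cap m hc hpos (by omega)]
          push_cast [hcapN]
          ring_nf
      · -- identical to the k = 0 base case
        have hda : cd ≤ a := by omega
        have hpb : cp ≤ b := by omega
        simp only [pvExpD, pvExpP] at hfuel ⊢
        rw [pvDrop_repl_ge _ _ hda, pvDrop_repl_ge _ _ hpb] at hfuel ⊢
        simp only [hpos, if_false]
        rw [hIH (a - cd) (b - cp) acc fuel hfuel]
        congr 1 <;> omega

theorem pvMain (cap : Int) (hc : 1 ≤ cap) :
    ∀ (segs : List (Nat × Nat)) (a b : Nat) (acc : Int) (fuel : Nat),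
      ((pvExpD segs).drop a).length + ((pvExpP segs).drop b).length ≤ fuel →
      pvLoopR cap.toNat fuel ((pvExpD segs).drop a) ((pvExpP segs).drop b) acc
        = pvSpecB cap segs (-(a : Int)) (-(b : Int)) acc := by
  intro segs
  induction segs with
  | nil =>
      intro a b acc fuel _
      simp only [pvExpD, pvExpP, List.drop_nil, pvSpecB]
      cases fuel <;> simp [pvLoopR]
  | cons s rest ih =>
      intro a b acc fuel hfuel
      obtain ⟨cd, cp⟩ := s
      have := pvInner cap hc cd cp rest ih ((max ((cd : Int) - a) ((cp : Int) - b)).toNat)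
        a b acc fuel (le_refl _) hfuel
      rw [this]
      simp only [pvSpecB]
      have e1 : (-(a : Int) + cd) = (cd : Int) - a := by omega
      have e2 : (-(b : Int) + cp) = (cp : Int) - b := by omega
      rw [e1, e2]

-- the stacks A builds are the (reversed) segment expansions
theorem pvSegs_succ (m : Nat) (d p : List Int) (hd : m < d.length) (hp : m < p.length) :
    pvSegs ((m : Int) + 1) d p = (((d.getD m 0).toNat, (p.getD m 0).toNat)) :: pvSegs (m : Int) d p := by
  unfold pvSegs
  have h1 : ((m : Int) + 1).toNat = m + 1 := by omega
  have h2 : ((m : Int)).toNat = m := by omega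
  rw [h1, h2]
  have e1 : List.take (m + 1) d = List.take m d ++ [d.getD m 0] := by
    rw [List.take_add_one]
    simp [List.getElem?_eq_getElem hd, List.getD_eq_getElem?_getD]
  have e2 : List.take (m + 1) p = List.take m p ++ [p.getD m 0] := by
    rw [List.take_add_one]
    simp [List.getElem?_eq_getElem hp, List.getD_eq_getElem?_getD]
  rw [e1, e2, List.zip_append (by simp; omega)]
  simp

theorem pvSegs_len (m : Nat) (d p : List Int) (hd : m ≤ d.length) (hp : m ≤ p.length) :
    (pvSegs (m : Int) d p).length = m := by
  unfold pvSegs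
  have h2 : ((m : Int)).toNat = m := by omega
  rw [h2]
  simp [List.length_zip]; omega

theorem pvBuild_eq (d p : List Int) : ∀ (m : Nat), m ≤ d.length → m ≤ p.length →
    pvBuild (m : Int) d p = ((pvExpD (pvSegs (m : Int) d p)).reverse, (pvExpP (pvSegs (m : Int) d p)).reverse) := by
  intro m
  induction m with
  | zero =>
      intro _ _
      simp [pvBuild, pvSegs, pvExpD, pvExpP, PySem.List.pyRange_one_eq_nil]
  | succ m ih =>
      intro hd hp
      have hrange : PySem.List.pyRange 0 ((m : Int) + 1) 1 = PySem.List.pyRange 0 (m : Int) 1 ++ [(m : Int)] := by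
        exact PySem.List.pyRange_one_succ_right (by omega)
      unfold pvBuild
      push_cast
      rw [hrange, List.foldl_append]
      have ihe := ih (by omega) (by omega)
      unfold pvBuild at ihe
      rw [ihe]
      simp only [List.foldl_cons, List.foldl_nil]
      rw [pvSegs_succ m d p (by omega) (by omega)]
      have hgd : (PySem.List.pyGet? d (m : Int)).getD 0 = (d.getD m 0) := by
        rw [PySem.List.pyGet?_natCast, ← List.getD_eq_getElem?_getD]
      have hgp : (PySem.List.pyGet? p (m : Int)).getD 0 = (p.getD m 0) := by
        rw [PySem.List.pyGet?_natCast, ← List.getD_eq_getElem?_getD]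
      rw [hgd, hgp]
      have hifd : (if (d.getD m 0) ≠ 0 then (pvExpD (pvSegs (m : Int) d p)).reverse ++ List.replicate (d.getD m 0).toNat ((m : Int) + 1) else (pvExpD (pvSegs (m : Int) d p)).reverse)
          = (pvExpD (pvSegs (m : Int) d p)).reverse ++ List.replicate (d.getD m 0).toNat ((m : Int) + 1) := by
        split
        · rfl
        · next h =>
            have h0 : (d.getD m 0) = 0 := by omega
            rw [h0]
            simp
      have hifp : (if (p.getD m 0) ≠ 0 then (pvExpP (pvSegs (m : Int) d p)).reverse ++ List.replicate (p.getD m 0).toNat ((m : Int) + 1) else (pvExpP (pvSegs (m : Int) d p)).reverse)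
          = (pvExpP (pvSegs (m : Int) d p)).reverse ++ List.replicate (p.getD m 0).toNat ((m : Int) + 1) := by
        split
        · rfl
        · next h =>
            have h0 : (p.getD m 0) = 0 := by omega
            rw [h0]
            simp
      simp only [hifd, hifp]
      rw [pvExpD, pvExpP]
      rw [pvSegs_len m d p (by omega) (by omega)]
      simp [List.reverse_append]

-- B's foldl equals pvSpecB
theorem pvAlt_eq (cap : Int) (d p : List Int) : ∀ (m : Nat), m ≤ d.length → m ≤ p.length →
    ∀ (ans dr pr : Int),
    (((PySem.List.pyRange 0 (m : Int) 1).reverse).foldl (fun (st : Int × Int × Int) i =>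
      let d_rem := st.2.1 + max ((PySem.List.pyGet? d i).getD 0) 0
      let p_rem := st.2.2 + max ((PySem.List.pyGet? p i).getD 0) 0
      let need := max d_rem p_rem
      if 0 < need then
        let trips := -(PySem.Int.floordiv (-need) cap)
        (st.1 + 2 * (i + 1) * trips, d_rem - trips * cap, p_rem - trips * cap)
      else (st.1, d_rem, p_rem)) (ans, dr, pr)).1
    = pvSpecB cap (pvSegs (m : Int) d p) dr pr ans := by
  intro m
  induction m with
  | zero =>
      intro _ _ ans dr pr
      simp [pvSegs, pvSpecB, PySem.List.pyRange_one_eq_nil]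
  | succ m ih =>
      intro hd hp ans dr pr
      have hrange : PySem.List.pyRange 0 ((m : Int) + 1) 1 = PySem.List.pyRange 0 (m : Int) 1 ++ [(m : Int)] := by
        exact PySem.List.pyRange_one_succ_right (by omega)
      push_cast
      rw [hrange, List.reverse_append]
      simp only [List.reverse_cons, List.reverse_nil, List.nil_append, List.singleton_append, List.foldl_cons]
      rw [pvSegs_succ m d p (by omega) (by omega)]
      have hgd : (PySem.List.pyGet? d (m : Int)).getD 0 = (d.getD m 0) := by
        rw [PySem.List.pyGet?_natCast, ← List.getD_eq_getElem?_getD]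
      have hgp : (PySem.List.pyGet? p (m : Int)).getD 0 = (p.getD m 0) := by
        rw [PySem.List.pyGet?_natCast, ← List.getD_eq_getElem?_getD]
      simp only [hgd, hgp]
      have hmaxd : max ((d.getD m 0)) 0 = (((d.getD m 0).toNat : Nat) : Int) := by omega
      have hmaxp : max ((p.getD m 0)) 0 = (((p.getD m 0).toNat : Nat) : Int) := by omega
      simp only [pvSpecB]
      simp only [hmaxd, hmaxp]
      rw [pvSegs_len m d p (by omega) (by omega)]
      split
      next h =>
        rw [← ih (by omega) (by omega)]
        simp only [pvCeil]
      next h =>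
        rw [← ih (by omega) (by omega)]

-- the degenerate branch of Pre_: no boxes at all
theorem pvExpD_nil_of_zero (segs : List (Nat × Nat)) (h : ∀ s ∈ segs, s.1 = 0) :
    pvExpD segs = [] := by
  induction segs with
  | nil => rfl
  | cons s rest ih =>
      rw [pvExpD, h s (by simp), ih (fun t ht => h t (by simp [ht]))]
      simp

theorem pvExpP_nil_of_zero (segs : List (Nat × Nat)) (h : ∀ s ∈ segs, s.2 = 0) :
    pvExpP segs = [] := by
  induction segs with
  | nil => rfl
  | cons s rest ih =>
      rw [pvExpP, h s (by simp), ih (fun t ht => h t (by simp [ht]))]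
      simp

theorem pvSpecB_zero (cap : Int) (segs : List (Nat × Nat))
    (h : ∀ s ∈ segs, s.1 = 0 ∧ s.2 = 0) : ∀ (acc : Int), pvSpecB cap segs 0 0 acc = acc := by
  induction segs with
  | nil => intro acc; rfl
  | cons s rest ih =>
      intro acc
      rw [pvSpecB]
      have h1 := (h s (by simp)).1
      have h2 := (h s (by simp)).2
      simp only [h1, h2]
      norm_num
      exact ih (fun t ht => h t (by simp [ht])) acc

theorem pvN_toNat (n : Int) : PySem.List.pyRange 0 n 1 = PySem.List.pyRange 0 ((n.toNat : Nat) : Int) 1 := by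
  by_cases h : 0 ≤ n
  · rw [Int.toNat_of_nonneg h]
  · rw [PySem.List.pyRange_one_eq_nil (by omega), PySem.List.pyRange_one_eq_nil (by omega)]

-- ===== VERDICT (by name: the statement is the Claim_ definition above) =====
theorem solution_spec : Claim_equal_solution := by
  intro cap n d p _ hpre
  obtain ⟨hnd, hnp, hcase⟩ := hpre
  unfold Spec_solution
  set m : Nat := n.toNat with hm
  have hmd : m ≤ d.length := by omega
  have hmp : m ≤ p.length := by omega
  have hbuild : pvBuild n d p = ((pvExpD (pvSegs (m : Int) d p)).reverse, (pvExpP (pvSegs (m : Int) d p)).reverse) := by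
    have h := pvBuild_eq d p m hmd hmp
    unfold pvBuild at h ⊢
    rw [pvN_toNat n, ← hm]
    exact h
  have halt : solution_alt cap n d p = pvSpecB cap (pvSegs (m : Int) d p) 0 0 0 := by
    unfold solution_alt
    rw [pvN_toNat n, ← hm]
    exact pvAlt_eq cap d p m hmd hmp 0 0 0
  rw [halt]
  unfold solution
  rw [hbuild]
  simp only
  rw [pvLoopA_eq_loopR, List.reverse_reverse, List.reverse_reverse]
  rcases hcase with hc | ⟨hzd, hzp⟩
  · have h := pvMain cap hc (pvSegs (m : Int) d p) 0 0 0
      ((pvExpD (pvSegs (m : Int) d p)).reverse.length + (pvExpP (pvSegs (m : Int) d p)).reverse.length)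
      (by simp)
    simpa using h
  · -- all counts ≤ 0: empty stacks, zero answer on both sides
    have hz : ∀ s ∈ pvSegs (m : Int) d p, s.1 = 0 ∧ s.2 = 0 := by
      intro s hs
      unfold pvSegs at hs
      obtain ⟨q, hq, rfl⟩ := List.mem_map.mp hs
      have hq' := List.mem_reverse.mp hq
      have hmem := List.of_mem_zip hq'
      have h1 := hzd q.1 (by simpa using hmem.1)
      have h2 := hzp q.2 (by simpa using hmem.2)
      constructor <;> simp <;> omega
    rw [pvExpD_nil_of_zero _ (fun s hs => (hz s hs).1),
        pvExpP_nil_of_zero _ (fun s hs => (hz s hs).2),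
        pvSpecB_zero cap _ hz 0]
    rfl
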